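-- pv_equiv track=rewrite | github.com/christian-oudard/project_euler | utility.py | _factor_pow2
-- ===== SOURCE A (Python) =====
-- def _factor_pow2(n):
--     """
--     Factor powers of two from n. Return (s, d), with d odd, such that
--     n = 2**s * d.
--     """
--     s = 0
--     d = n
--     while not d & 1:
--         d >>= 1
--         s += 1
--     assert 2**s * d == n
--     return s, d
-- ===== SOURCE B (Python) =====
-- def _factor_pow2(n):
--     """
--     Factor powers of two from n. Return (s, d), with d odd, such that
--     n = 2**s * d.
--     """
--     low = n & -n
--     s = low.bit_length() - 1
--     d = n >> s
--     assert 2**s * d == n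
--     return s, d
-- ===== Notes on version B (the rewrite author's own statement) =====
-- stated objective: idiomatic
-- what changed: Replaces the while-loop that repeatedly shifts out factors of two with the loop-free two's-complement trick: low = n & -n isolates the lowest set bit, s = low.bit_length() - 1 is the exponent, d = n >> s; Pre_ excludes only n = 0, where A loops forever (and B raises).
-- outside the precondition, e.g. on _factor_pow2(0): A does not finish within the time limit, B raises ValueError
import Mathlib
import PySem

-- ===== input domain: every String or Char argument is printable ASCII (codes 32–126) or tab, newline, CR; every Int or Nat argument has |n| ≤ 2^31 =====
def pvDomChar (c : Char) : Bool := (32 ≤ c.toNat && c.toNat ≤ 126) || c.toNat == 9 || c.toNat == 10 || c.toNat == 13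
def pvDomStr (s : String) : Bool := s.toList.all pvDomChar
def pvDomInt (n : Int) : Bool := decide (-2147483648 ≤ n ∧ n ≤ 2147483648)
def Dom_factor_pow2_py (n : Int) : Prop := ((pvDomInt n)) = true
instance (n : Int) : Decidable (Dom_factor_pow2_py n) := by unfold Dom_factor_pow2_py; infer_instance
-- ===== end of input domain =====

-- B replaces A's while-loop by the loop-free lowest-set-bit trick (n & -n); equivalence is
-- proved for all n ≠ 0 (at n = 0 A never returns: its loop runs forever).

-- ===== PORT A =====
-- the while-loop of A: while not d & 1: d >>= 1; s += 1.  The `d ≠ 0` conjunct is only a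
-- totality guard (Python loops forever at d = 0, which Pre_ excludes).
def pvLoopA (s d : Int) : Int × Int :=
  if h : d % 2 = 0 ∧ d ≠ 0 then pvLoopA (s + 1) (d >>> (1:ℕ)) else (s, d)
termination_by d.natAbs
decreasing_by
  obtain ⟨e, he⟩ : ∃ e, d = 2 * e := ⟨d / 2, by omega⟩
  have h1 : d >>> (1:ℕ) = e := by
    rw [Int.shiftRight_eq_div_pow, he]; norm_num
  rw [h1]; subst he
  have : e ≠ 0 := by rintro rfl; exact h.2 (by ring)
  simp [Int.natAbs_mul]; omega

-- A's assert `2**s * d == n` always succeeds when the loop terminates, so it is not modelled.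
def factor_pow2_py (n : Int) : Int × Int := pvLoopA 0 n

-- ===== PORT B =====
-- low = n & -n; s = low.bit_length() - 1; d = n >> s.  `Nat.size` is bit_length on the
-- nonnegative low; `.toNat` on the shift amount is only reached at n = 0 (outside Pre_,
-- where Python B raises ValueError on the negative shift).
def factor_pow2_py_alt (n : Int) : Int × Int :=
  let low : Int := Int.land n (-n)
  let s : Int := (low.toNat.size : Int) - 1
  let d : Int := n >>> s.toNat
  (s, d)

-- ===== PRECONDITION & SPEC =====
-- Pre_ excludes exactly n = 0: there A's while-loop never terminates (A returns nothing).
def Pre_factor_pow2_py (n : Int) : Prop := n ≠ 0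
instance (n : Int) : Decidable (Pre_factor_pow2_py n) := by unfold Pre_factor_pow2_py; infer_instance
def pvWitness_factor_pow2_py : Int := 12

def Spec_factor_pow2_py (n : Int) (out : Int × Int) : Prop := out = factor_pow2_py_alt n
instance (n : Int) (out : Int × Int) : Decidable (Spec_factor_pow2_py n out) := by unfold Spec_factor_pow2_py; infer_instance

-- ===== CLAIM (what is proved, stated in full; the proofs are below) =====
def Claim_equal_factor_pow2_py : Prop := ∀ (n : Int), Dom_factor_pow2_py n → Pre_factor_pow2_py n → Spec_factor_pow2_py n (factor_pow2_py n)

-- ===== LEMMAS AND PROOFS =====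

-- the lowest set bit of an odd number, at Nat.ldiff level
theorem pv_ldiff_odd (j : ℕ) : Nat.ldiff (2 * j + 1) (2 * j) = 1 := by
  apply Nat.eq_of_testBit_eq
  intro i
  cases i with
  | zero =>
      rw [Nat.testBit_ldiff]
      simp
  | succ i =>
      have h1 : (2 * j + 1) / 2 = j := by omega
      have h2 : (2 * j) / 2 = j := by omega
      rw [Nat.testBit_ldiff, Nat.testBit_succ, Nat.testBit_succ, Nat.testBit_succ, h1, h2]
      simp

theorem pv_land_neg_odd (n : Int) (h : n % 2 = 1) : Int.land n (-n) = 1 := by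
  cases n with
  | ofNat m =>
      rw [Int.ofNat_eq_natCast] at h
      obtain ⟨j, rfl⟩ : ∃ j, m = 2 * j + 1 := ⟨m / 2, by omega⟩
      have hneg : -(Int.ofNat (2 * j + 1)) = Int.negSucc (2 * j) := by
        rw [Int.negSucc_eq, Int.ofNat_eq_natCast]; push_cast; ring
      rw [Int.ofNat_eq_natCast] at hneg ⊢
      rw [hneg]
      show ((Nat.ldiff (2 * j + 1) (2 * j) : ℕ) : ℤ) = 1
      rw [pv_ldiff_odd]; rfl
  | negSucc m =>
      rw [Int.negSucc_eq] at h
      obtain ⟨j, rfl⟩ : ∃ j, m = 2 * j := ⟨m / 2, by omega⟩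
      have hneg : -(Int.negSucc (2 * j)) = Int.ofNat (2 * j + 1) := by
        rw [Int.negSucc_eq, Int.ofNat_eq_natCast]; push_cast; ring
      rw [hneg]
      show ((Nat.ldiff (2 * j + 1) (2 * j) : ℕ) : ℤ) = 1
      rw [pv_ldiff_odd]; rfl

theorem pv_land_two_mul (a b : Int) : Int.land (2 * a) (2 * b) = 2 * Int.land a b := by
  have := Int.land_bit false a false b
  simpa [Int.bit_val] using this

theorem pv_land_neg_pow (k : ℕ) (d : Int) (hd : d % 2 = 1) :
    Int.land (2 ^ k * d) (-(2 ^ k * d)) = 2 ^ k := by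
  induction k with
  | zero => simpa using pv_land_neg_odd d hd
  | succ k ih =>
      have h1 : (2 : ℤ) ^ (k + 1) * d = 2 * (2 ^ k * d) := by ring
      rw [h1, show -(2 * ((2:ℤ) ^ k * d)) = 2 * (-(2 ^ k * d)) from by ring,
        pv_land_two_mul, ih]
      ring

theorem pv_shift_pow (k : ℕ) (d : Int) : (2 ^ k * d) >>> k = d := by
  rw [Int.shiftRight_eq_div_pow]
  push_cast
  exact Int.mul_ediv_cancel_left d (by positivity)

theorem pv_loopA_pow (k : ℕ) (d : Int) (hd : d % 2 = 1) (s : Int) :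
    pvLoopA s (2 ^ k * d) = (s + k, d) := by
  induction k generalizing s with
  | zero =>
      rw [pvLoopA]
      have hcond : ¬ ((2 : ℤ) ^ 0 * d % 2 = 0 ∧ (2 : ℤ) ^ 0 * d ≠ 0) := by
        simp; omega
      rw [dif_neg hcond]
      simp
  | succ k ih =>
      rw [pvLoopA]
      have hcond : (2 : ℤ) ^ (k + 1) * d % 2 = 0 ∧ (2 : ℤ) ^ (k + 1) * d ≠ 0 := by
        constructor
        · have h : (2 : ℤ) ^ (k + 1) * d = 2 * (2 ^ k * d) := by ring
          omega
        · have hd0 : d ≠ 0 := by omega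
          positivity
      rw [dif_pos hcond]
      rw [show (2:ℤ) ^ (k + 1) * d = 2 ^ 1 * (2 ^ k * d) from by ring,
        pv_shift_pow 1, ih (s + 1)]
      congr 1
      push_cast; ring

theorem pv_exists_pow_odd (n : Int) (h : n ≠ 0) :
    ∃ (k : ℕ) (d : Int), d % 2 = 1 ∧ n = 2 ^ k * d := by
  obtain ⟨k, m, hm, heq⟩ :=
    Nat.exists_eq_pow_mul_and_not_dvd (n := n.natAbs) (by simpa using h) 2 (by norm_num)
  have hmodd : (m : ℤ) % 2 = 1 := by omega
  rcases Int.natAbs_eq n with hn | hn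
  · exact ⟨k, m, hmodd, by rw [hn, heq]; push_cast; ring⟩
  · refine ⟨k, -m, by omega, ?_⟩
    rw [hn, heq]; push_cast; ring

theorem pv_alt_eval (k : ℕ) (d : Int) (hd : d % 2 = 1) :
    factor_pow2_py_alt (2 ^ k * d) = ((k : ℤ), d) := by
  show ((((Int.land (2 ^ k * d) (-(2 ^ k * d))).toNat.size : Int) - 1),
      (2 ^ k * d) >>> (((Int.land (2 ^ k * d) (-(2 ^ k * d))).toNat.size : Int) - 1).toNat)
    = ((k : ℤ), d)
  rw [pv_land_neg_pow k d hd]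
  have h1 : ((2 : ℤ) ^ k).toNat = 2 ^ k := by
    rw [show ((2 : ℤ) ^ k) = ((2 ^ k : ℕ) : ℤ) from by push_cast; ring, Int.toNat_natCast]
  rw [h1, Nat.size_pow]
  rw [show ((k + 1 : ℕ) : ℤ) - 1 = (k : ℤ) from by push_cast; ring]
  rw [Int.toNat_natCast k, pv_shift_pow k d]

-- ===== VERDICT (by name: the statement is the Claim_ definition above) =====
theorem factor_pow2_py_spec : Claim_equal_factor_pow2_py := by
  intro n _ hpre
  obtain ⟨k, d, hd, rfl⟩ := pv_exists_pow_odd n hpre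
  show factor_pow2_py _ = _
  unfold factor_pow2_py
  rw [pv_loopA_pow k d hd 0, pv_alt_eval k d hd]
  simp
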